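-- pv_equiv track=rewrite | github.com/GabrielTrettel/DiariesProcessor | src/gazette.py | lines_to_text
-- ===== SOURCE A (Python) =====
-- def lines_to_text(lines):
--     max_cols = max(map(lambda x: len(x), lines))
--     txt = ""
--     for col_i in range(max_cols):
--         for line in lines:
--             if len(line) > col_i:
--                 txt += "".join(line[col_i].strip('\n')) + '\n'
--
--     return txt[:-1]
-- ===== SOURCE B (Python) =====
-- def lines_to_text(lines):
--     # Return-value equivalent to A for non-empty `lines`; on `lines == []` A
--     # raises ValueError while this returns "".
--     rows = [list(line) for line in lines]
--     cells = []
--     while any(rows):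
--         for row in rows:
--             if row:
--                 cells.append(row.pop(0))
--     return "\n".join(cell.strip('\n') for cell in cells)
-- ===== Notes on version B (the rewrite author's own statement) =====
-- stated objective: alternative
-- what changed: B transposes the table by repeatedly popping the head of every non-empty row into one flat column-major cell list and joins it once with '\n'.join, instead of A's range(max_cols) x lines index-driven nested loops that accumulate a string cell by cell and finally slice off the trailing newline.
-- outside the precondition, e.g. on lines_to_text([]): A raises ValueError, B returns ''
-- crash fix: On lines == [] A raises ValueError (max() of an empty sequence) while B returns ''. — e.g. on lines_to_text([]): A raises ValueError, B returns ""
import Mathlib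
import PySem

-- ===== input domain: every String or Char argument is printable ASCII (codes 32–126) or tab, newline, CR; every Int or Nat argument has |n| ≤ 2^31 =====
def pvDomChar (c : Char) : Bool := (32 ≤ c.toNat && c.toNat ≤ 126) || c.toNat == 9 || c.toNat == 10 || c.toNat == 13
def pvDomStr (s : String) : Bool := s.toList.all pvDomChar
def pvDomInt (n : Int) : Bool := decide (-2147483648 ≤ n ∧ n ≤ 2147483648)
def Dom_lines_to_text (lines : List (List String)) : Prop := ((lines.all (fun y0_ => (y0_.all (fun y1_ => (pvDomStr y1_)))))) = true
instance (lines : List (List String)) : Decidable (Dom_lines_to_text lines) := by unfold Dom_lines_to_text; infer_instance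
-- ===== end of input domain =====

-- B repeatedly pops the heads of all rows (an explicit column-major transpose into one flat cell
-- list joined once with '\n') instead of A's index-driven nested loops accumulating a string that
-- is finally sliced; objective: alternative (not faster). Return values only; neither mutates input.

-- ===== PORT A =====
def lines_to_text (lines : List (List String)) : String :=
  match ((lines.map (fun x => x.length) : List Nat)).max? with
  | none => ""   -- Python raises ValueError (max of empty sequence) here; excluded by Pre_
  | some max_cols =>
    let txt : String :=
      (PySem.List.pyRange 0 (max_cols : Int) 1).foldl (fun txt col_i =>
        lines.foldl (fun txt line =>
          if (line.length : Int) > col_i then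
            txt ++ PySem.Str.stripChars ((PySem.List.pyGet? line col_i).getD "") "\n" ++ "\n"
          else txt) txt) ""
    PySem.Str.slice txt none (some (-1))

-- ===== PORT B =====
-- termination helpers for the while-loop (total popped length strictly decreases)
theorem tail_len_le (l : List String) : l.tail.length ≤ l.length := by cases l <;> simp

theorem sum_tails_le (rows : List (List String)) :
    ((rows.map List.tail).map List.length).sum ≤ (rows.map List.length).sum := by
  induction rows with
  | nil => simp
  | cons b u ihu =>
    simp only [List.map_cons, List.sum_cons]
    have := tail_len_le b; omega

theorem sum_tails_lt (rows : List (List String)) (r : List String) (hr : r ∈ rows) (hne : r ≠ []) :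
    ((rows.map List.tail).map List.length).sum < (rows.map List.length).sum := by
  induction rows with
  | nil => cases hr
  | cons a t ih =>
    simp only [List.map_cons, List.sum_cons]
    rcases List.mem_cons.mp hr with hm | hm
    · subst hm
      have h1 : r.tail.length < r.length := by
        cases r with
        | nil => exact absurd rfl hne
        | cons x xs => simp
      have := sum_tails_le t; omega
    · have := ih hm
      have := tail_len_le a; omega

-- the 'while any(rows): for row in rows: if row: cells.append(row.pop(0))' loop of Source B
def altLoop (rows : List (List String)) (cells : List String) : List String :=
  if rows.any (fun r => ¬ r.isEmpty) then
    altLoop (rows.map List.tail) (cells ++ rows.filterMap List.head?)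
  else cells
termination_by (rows.map List.length).sum
decreasing_by
  rename_i h
  simp only [List.any_eq_true, decide_eq_true_eq, List.isEmpty_iff] at h
  obtain ⟨r, hr, hne⟩ := h
  simp only [List.map_map]
  have hlt := sum_tails_lt rows r hr hne
  simpa [List.map_map, Function.comp_def] using hlt

def lines_to_text_alt (lines : List (List String)) : String :=
  PySem.Str.join "\n" ((altLoop lines []).map (fun c => PySem.Str.stripChars c "\n"))

-- ===== PRECONDITION & SPEC =====
-- Pre_ excludes only the empty outer list, on which Python A raises ValueError (max() of an empty sequence).
def Pre_lines_to_text (lines : List (List String)) : Prop := lines ≠ []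
instance (lines : List (List String)) : Decidable (Pre_lines_to_text lines) := by unfold Pre_lines_to_text; infer_instance
def pvWitness_lines_to_text : List (List String) := [["a", "b"], ["c"]]

-- On lines = [] A raises ValueError (max() arg is an empty sequence); B returns "".
def Raises_lines_to_text (lines : List (List String)) : Prop := lines = []
instance (lines : List (List String)) : Decidable (Raises_lines_to_text lines) := by unfold Raises_lines_to_text; infer_instance
def pvRaiseWitness_lines_to_text : List (List String) := []
def pvRaiseWitnessOut_lines_to_text : String := ""

def Spec_lines_to_text (lines : List (List String)) (out : String) : Prop := out = lines_to_text_alt lines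
instance (lines : List (List String)) (out : String) : Decidable (Spec_lines_to_text lines out) := by unfold Spec_lines_to_text; infer_instance

-- ===== CLAIM (what is proved, stated in full; the proofs are below) =====
def Claim_equal_lines_to_text : Prop := ∀ (lines : List (List String)), Dom_lines_to_text lines → Pre_lines_to_text lines → Spec_lines_to_text lines (lines_to_text lines)
def Claim_raises_lines_to_text : Prop := (∀ (lines : List (List String)), Dom_lines_to_text lines → Raises_lines_to_text lines → ¬ Pre_lines_to_text lines) ∧ (Dom_lines_to_text (pvRaiseWitness_lines_to_text) ∧ Raises_lines_to_text (pvRaiseWitness_lines_to_text) ∧ lines_to_text_alt (pvRaiseWitness_lines_to_text) = pvRaiseWitnessOut_lines_to_text)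

-- ===== LEMMAS AND PROOFS =====

-- the cells of column i (from the lines long enough to have one), in line order
def pvCol (lines : List (List String)) (i : Nat) : List String :=
  lines.filterMap (fun l => l[i]?)

-- all cells in column-major order, given the number of columns
def pvCells (lines : List (List String)) (m : Nat) : List String :=
  (List.range m).flatMap (fun i => pvCol lines i)

-- A's accumulated text: each cell stripped of newlines, followed by '\n'
def pvCat (cs : List String) : String :=
  cs.foldr (fun c acc => PySem.Str.stripChars c "\n" ++ ("\n" ++ acc)) ""

def pvMaxLen (rows : List (List String)) : Nat :=
  (rows.map List.length).foldr max 0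

theorem pvCat_append (a b : List String) : pvCat (a ++ b) = pvCat a ++ pvCat b := by
  induction a with
  | nil => simp [pvCat]
  | cons c t ih =>
    simp only [pvCat, List.foldr_cons, List.cons_append] at *
    rw [ih, String.append_assoc, String.append_assoc]

theorem inner_foldl (lines : List (List String)) (i : Nat) (t : String) :
    lines.foldl (fun txt line =>
        if (line.length : Int) > (i : Int) then
          txt ++ PySem.Str.stripChars ((PySem.List.pyGet? line (i : Int)).getD "") "\n" ++ "\n"
        else txt) t
      = t ++ pvCat (pvCol lines i) := by
  induction lines generalizing t with
  | nil => simp [pvCol, pvCat]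
  | cons l rest ih =>
    simp only [List.foldl_cons, pvCol, List.filterMap_cons]
    by_cases h : i < l.length
    · have hlt : ((l.length : Int) > (i : Int)) := by exact_mod_cast h
      have hget : l[i]? = some l[i] := List.getElem?_eq_getElem h
      rw [if_pos hlt]
      rw [PySem.List.pyGet?_natCast, hget]
      rw [ih]
      simp only [pvCol, Option.getD_some, pvCat, List.foldr_cons]
      rw [String.append_assoc, String.append_assoc]
    · have hlt : ¬ ((l.length : Int) > (i : Int)) := by
        simp only [not_lt]; exact_mod_cast Nat.le_of_not_lt h
      have hget : l[i]? = none := List.getElem?_eq_none (Nat.le_of_not_lt h)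
      rw [if_neg hlt, hget]
      exact ih t

theorem outer_foldl (lines : List (List String)) (m : Nat) :
    (PySem.List.pyRange 0 (m : Int) 1).foldl (fun txt col_i =>
        lines.foldl (fun txt line =>
          if (line.length : Int) > col_i then
            txt ++ PySem.Str.stripChars ((PySem.List.pyGet? line col_i).getD "") "\n" ++ "\n"
          else txt) txt) ""
      = pvCat (pvCells lines m) := by
  rw [PySem.List.pyRange_zero_natCast]
  suffices h : ∀ (t : String),
      ((List.range m).map (fun k : Nat => (k : Int))).foldl (fun txt col_i =>
        lines.foldl (fun txt line =>
          if (line.length : Int) > col_i then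
            txt ++ PySem.Str.stripChars ((PySem.List.pyGet? line col_i).getD "") "\n" ++ "\n"
          else txt) txt) t = t ++ pvCat (pvCells lines m) by
    rw [h ""]; simp
  induction m with
  | zero => intro t; simp [pvCells, pvCat]
  | succ n ih =>
    intro t
    rw [List.range_succ, List.map_append, List.foldl_append, List.map_cons, List.map_nil,
      List.foldl_cons, List.foldl_nil, ih, inner_foldl]
    simp only [pvCells, List.range_succ, List.flatMap_append, List.flatMap_cons,
      List.flatMap_nil, List.append_nil, pvCat_append, String.append_assoc]

theorem col_succ (rows : List (List String)) (i : Nat) :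
    pvCol rows (i + 1) = pvCol (rows.map List.tail) i := by
  simp only [pvCol, List.filterMap_map]
  congr 1
  funext l
  cases l <;> simp

theorem col_zero (rows : List (List String)) :
    pvCol rows 0 = rows.filterMap List.head? := by
  simp only [pvCol]
  congr 1
  funext l
  cases l <;> simp

theorem maxLen_tail (rows : List (List String)) :
    pvMaxLen (rows.map List.tail) = pvMaxLen rows - 1 := by
  induction rows with
  | nil => simp [pvMaxLen]
  | cons r t ih =>
    simp only [pvMaxLen, List.map_cons, List.foldr_cons] at *
    rw [ih]
    have : r.tail.length = r.length - 1 := by cases r <;> simp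
    rw [this]
    omega

theorem cells_step (rows : List (List String)) (h : 0 < pvMaxLen rows) :
    pvCells rows (pvMaxLen rows)
      = rows.filterMap List.head? ++ pvCells (rows.map List.tail) (pvMaxLen (rows.map List.tail)) := by
  rw [maxLen_tail]
  obtain ⟨n, hn⟩ : ∃ n, pvMaxLen rows = n + 1 := ⟨pvMaxLen rows - 1, by omega⟩
  rw [hn]
  simp only [Nat.add_sub_cancel, pvCells, List.range_succ_eq_map, List.flatMap_cons,
    List.flatMap_map]
  rw [col_zero]
  congr 1
  apply List.flatMap_congr
  intro i _
  exact col_succ rows i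

theorem maxLen_zero_iff (rows : List (List String)) :
    pvMaxLen rows = 0 ↔ rows.any (fun r => ¬ r.isEmpty) = false := by
  induction rows with
  | nil => simp [pvMaxLen]
  | cons r t ih =>
    simp only [pvMaxLen, List.map_cons, List.foldr_cons, List.any_cons, Bool.or_eq_false_iff] at *
    constructor
    · intro h
      refine ⟨by simp [List.length_eq_zero_iff.mp (by omega : r.length = 0)], ih.mp (by omega)⟩
    · rintro ⟨h1, h2⟩
      have hre : r.isEmpty := by simpa using h1
      have := ih.mpr h2
      rw [List.isEmpty_iff.mp hre]
      simp
      omega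

theorem foldr_max_eq_max? (l : List Nat) : l.foldr max 0 = (l.max?).getD 0 := by
  induction l with
  | nil => simp
  | cons a t ih =>
    rw [List.foldr_cons, ih]
    cases h : t.max? with
    | none => simp [List.max?_cons, h]
    | some b => simp [List.max?_cons, h]

theorem altLoop_eq (rows : List (List String)) (cells : List String) :
    altLoop rows cells = cells ++ pvCells rows (pvMaxLen rows) := by
  generalize hm : pvMaxLen rows = m
  induction m generalizing rows cells with
  | zero =>
    unfold altLoop
    rw [if_neg (by simp only [(maxLen_zero_iff rows).mp hm]; simp)]
    simp [pvCells]
  | succ n ih =>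
    unfold altLoop
    have hany : rows.any (fun r => ¬ r.isEmpty) = true := by
      by_contra hc
      have := (maxLen_zero_iff rows).mpr (Bool.eq_false_iff.mpr hc)
      omega
    rw [if_pos hany]
    have htail : pvMaxLen (rows.map List.tail) = n := by
      rw [maxLen_tail, hm]
      omega
    rw [ih _ _ htail, ← hm, cells_step rows (by omega), htail]
    simp [List.append_assoc]

theorem cat_dropLast (cs : List String) :
    (pvCat cs).toList.dropLast
      = (PySem.Str.join "\n" (cs.map (fun c => PySem.Str.stripChars c "\n"))).toList := by
  induction cs with
  | nil => simp [pvCat, PySem.Str.toList_join, PySem.Chars.join_nil]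
  | cons c t ih =>
    cases t with
    | nil =>
      simp only [pvCat, List.foldr_cons, List.foldr_nil, List.map_cons, List.map_nil,
        PySem.Str.toList_join, PySem.Chars.join_singleton, String.toList_append]
      rw [List.dropLast_append_of_ne_nil (by simp)]
      simp
    | cons c' t' =>
      simp only [pvCat, List.foldr_cons] at ih ⊢
      rw [String.toList_append, String.toList_append,
        List.dropLast_append_of_ne_nil (by simp),
        List.dropLast_append_of_ne_nil (by simp)]
      rw [ih]
      simp only [List.map_cons, PySem.Str.toList_join, PySem.Chars.join_cons_cons]
      simp

theorem main_eq (lines : List (List String)) (h : lines ≠ []) :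
    lines_to_text lines = lines_to_text_alt lines := by
  unfold lines_to_text
  cases hmax : ((lines.map (fun x => x.length) : List Nat)).max? with
  | none =>
    exact absurd (List.map_eq_nil_iff.mp (List.max?_eq_none_iff.mp hmax)) h
  | some m =>
    have hm : pvMaxLen lines = m := by
      rw [pvMaxLen]
      show (lines.map List.length).foldr max 0 = m
      rw [foldr_max_eq_max?]
      have : lines.map (fun x => x.length) = lines.map List.length := rfl
      rw [← this, hmax]
      rfl
    simp only [outer_foldl lines m]
    unfold lines_to_text_alt
    rw [altLoop_eq, List.nil_append, hm]
    rw [← String.toList_inj, PySem.Str.slice_to_neg_one, cat_dropLast]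

-- ===== VERDICT (by name: the statement is the Claim_ definition above) =====
theorem lines_to_text_spec : Claim_equal_lines_to_text := by
  intro lines _ hpre
  unfold Spec_lines_to_text
  exact main_eq lines hpre

def lines_to_text_raises : Claim_raises_lines_to_text := by
  unfold Claim_raises_lines_to_text
  refine ⟨?_, by decide, by decide, ?_⟩
  · intro lines _ hr
    unfold Raises_lines_to_text at hr
    unfold Pre_lines_to_text
    simp [hr]
  · have h0 : altLoop ([] : List (List String)) [] = [] := by
      unfold altLoop; simp
    unfold lines_to_text_alt pvRaiseWitness_lines_to_text pvRaiseWitnessOut_lines_to_text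
    rw [h0]
    rw [← String.toList_inj, PySem.Str.toList_join]
    simp [PySem.Chars.join_nil]
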